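-- pv_equiv track=rewrite | github.com/yakupcannn/LLMFromScratch | tokenizers/byte_pair_tokenizer_hands_on.py | _transform_splits
-- ===== SOURCE A (Python) =====
-- def _transform_splits(best_pair,splits):
--     new_splits = {}
--     for word,split in splits.items():
--         for i in range(len(split)-1):
--             if best_pair[0] == split[i] and best_pair[1] == split[i+1]:
--                 split = split[:i] + ["".join(best_pair)] + split[i+2:]
--                 break
--         new_splits[word] = split
--     return new_splits
-- ===== SOURCE B (Python) =====
-- def _transform_splits(best_pair, splits):
--     p0, p1 = best_pair
--     merged_tok = p0 + p1
--     new_splits = {}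
--     for word, split in splits.items():
--         out = []
--         i = 0
--         n = len(split)
--         merged = False
--         while i < n:
--             if not merged and i + 1 < n and split[i] == p0 and split[i + 1] == p1:
--                 out.append(merged_tok)
--                 i += 2
--                 merged = True
--             else:
--                 out.append(split[i])
--                 i += 1
--         new_splits[word] = out
--     return new_splits
-- ===== Notes on version B (the rewrite author's own statement) =====
-- stated objective: alternative
-- what changed: The inner merge is rewritten from A's index scan with find-then-slice splicing (split[:i] + [joined] + split[i+2:]) into a single forward accumulation pass that builds the new token list with a 'merged' flag, merging the first matching adjacent pair in place and copying the rest verbatim.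
import Mathlib
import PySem

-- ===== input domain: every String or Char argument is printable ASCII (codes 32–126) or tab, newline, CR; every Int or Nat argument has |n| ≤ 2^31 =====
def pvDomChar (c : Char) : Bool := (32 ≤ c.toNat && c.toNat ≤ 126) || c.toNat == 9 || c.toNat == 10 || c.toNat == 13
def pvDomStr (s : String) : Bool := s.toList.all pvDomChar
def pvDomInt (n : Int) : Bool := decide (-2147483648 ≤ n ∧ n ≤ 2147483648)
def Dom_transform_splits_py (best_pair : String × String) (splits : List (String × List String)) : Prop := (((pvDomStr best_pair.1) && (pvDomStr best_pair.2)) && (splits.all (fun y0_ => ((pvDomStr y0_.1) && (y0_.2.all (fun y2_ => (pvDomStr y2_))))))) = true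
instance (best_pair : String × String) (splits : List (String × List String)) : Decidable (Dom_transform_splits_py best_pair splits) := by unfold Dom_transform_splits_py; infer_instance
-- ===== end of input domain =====

-- B replaces A's index-scan + slice-splice inner merge by a single forward flag-driven
-- accumulation pass over each split (objective: alternative decomposition, same cost).

-- ===== PORT A =====
-- A's inner 'for i in range(len(split)-1): if match: split = split[:i] + ["".join(best_pair)] + split[i+2:]; break'
-- (slices with nonnegative in-range bounds are exactly List.take / List.drop)
-- the loop counter is ported as the number of remaining iterations (fuel = len(split)-1-i);
-- inside the loop i and i+1 are always in range, so split.getD is exactly Python's split[i]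
def pvAInner (best_pair : String × String) (split : List String) (i : Nat) : Nat → List String
  | 0 => split
  | fuel + 1 =>
    if best_pair.1 == split.getD i "" && best_pair.2 == split.getD (i+1) "" then
      split.take i ++ [best_pair.1 ++ best_pair.2] ++ split.drop (i+2)
    else pvAInner best_pair split (i+1) fuel

def transform_splits_py (best_pair : String × String) (splits : List (String × List String)) : List (String × List String) :=
  (splits.foldl
    (fun (acc : PySem.Dict String (List String)) ws => acc.insert ws.1 (pvAInner best_pair ws.2 0 (ws.2.length - 1)))
    PySem.Dict.empty).items

-- ===== PORT B =====
-- B's 'while i < n' loop building `out`, with the `merged` flag and a lookahead at i+1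
def pvBLoop (p0 p1 : String) (merged : Bool) : List String → List String
  | [] => []
  | x :: rest =>
    match rest with
    | y :: rest' =>
      if !merged && x == p0 && y == p1 then (p0 ++ p1) :: pvBLoop p0 p1 true rest'
      else x :: pvBLoop p0 p1 merged (y :: rest')
    | [] => [x]

def transform_splits_py_alt (best_pair : String × String) (splits : List (String × List String)) : List (String × List String) :=
  (splits.foldl
    (fun (acc : PySem.Dict String (List String)) ws => acc.insert ws.1 (pvBLoop best_pair.1 best_pair.2 false ws.2))
    PySem.Dict.empty).items

-- ===== PRECONDITION & SPEC =====
def Spec_transform_splits_py (best_pair : String × String) (splits : List (String × List String)) (out : List (String × List String)) : Prop := out = transform_splits_py_alt best_pair splits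
instance (best_pair : String × String) (splits : List (String × List String)) (out : List (String × List String)) : Decidable (Spec_transform_splits_py best_pair splits out) := by unfold Spec_transform_splits_py; infer_instance

-- ===== CLAIM (what is proved, stated in full; the proofs are below) =====
def Claim_equal_transform_splits_py : Prop := ∀ (best_pair : String × String) (splits : List (String × List String)), Dom_transform_splits_py best_pair splits → Spec_transform_splits_py best_pair splits (transform_splits_py best_pair splits)

-- ===== LEMMAS AND PROOFS =====

lemma pvBLoop_true (p0 p1 : String) : ∀ l : List String, pvBLoop p0 p1 true l = l := by
  intro l
  induction l with
  | nil => rfl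
  | cons x rest ih =>
    cases rest with
    | nil => rfl
    | cons y rest' => simp [pvBLoop] at ih ⊢; exact ih

lemma pvBLoop_short (p0 p1 : String) (l : List String) (h : l.length ≤ 1) :
    pvBLoop p0 p1 false l = l := by
  match l, h with
  | [], _ => rfl
  | [x], _ => rfl

lemma pvAInner_stop (bp : String × String) (split : List String) (i : Nat)
    (h : ¬ i < split.length - 1) :
    split = split.take i ++ pvBLoop bp.1 bp.2 false (split.drop i) := by
  have hlen : (split.drop i).length ≤ 1 := by simp; omega
  rw [pvBLoop_short _ _ _ hlen, List.take_append_drop]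

lemma pvAInner_eq (bp : String × String) (split : List String) :
    ∀ (fuel i : Nat), fuel = split.length - 1 - i →
      pvAInner bp split i fuel = split.take i ++ pvBLoop bp.1 bp.2 false (split.drop i) := by
  intro fuel
  induction fuel with
  | zero =>
    intro i hf
    exact pvAInner_stop bp split i (by omega)
  | succ fuel ih =>
    intro i hf
    have h1 : i < split.length := by omega
    have h2 : i + 1 < split.length := by omega
    rw [pvAInner]
    rw [List.getD_eq_getElem split "" h1, List.getD_eq_getElem split "" h2]
    by_cases hc : (bp.1 == split[i] && bp.2 == split[i+1]) = true
    · rw [if_pos hc]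
      rw [List.drop_eq_getElem_cons h1, List.drop_eq_getElem_cons h2]
      simp only [Bool.and_eq_true, beq_iff_eq] at hc
      simp [pvBLoop, hc.1.symm, hc.2.symm, pvBLoop_true]
    · rw [if_neg hc]
      rw [ih (i + 1) (by omega)]
      rw [List.drop_eq_getElem_cons h1, List.drop_eq_getElem_cons h2]
      simp only [Bool.and_eq_true, beq_iff_eq, not_and_or] at hc
      have hcond : (!false && (split[i] == bp.1) && (split[i+1] == bp.2)) = false := by
        rcases hc with hc | hc
        · have h' : (split[i] == bp.1) = false := by
            simp only [beq_eq_false_iff_ne]; exact fun h' => hc h'.symm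
          simp [h']
        · have h' : (split[i+1] == bp.2) = false := by
            simp only [beq_eq_false_iff_ne]; exact fun h' => hc h'.symm
          simp [h']
      rw [pvBLoop]
      simp only [hcond]
      rw [← List.drop_eq_getElem_cons h2]
      have ht : split.take (i + 1) = split.take i ++ [split[i]] := by
        rw [List.take_add_one, List.getElem?_eq_getElem h1]
        rfl
      rw [ht, List.append_assoc]
      rfl

lemma fold_eq (bp : String × String) :
    ∀ (l : List (String × List String)) (acc : PySem.Dict String (List String)),
      l.foldl (fun acc ws => acc.insert ws.1 (pvAInner bp ws.2 0 (ws.2.length - 1))) acc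
      = l.foldl (fun acc ws => acc.insert ws.1 (pvBLoop bp.1 bp.2 false ws.2)) acc := by
  intro l
  induction l with
  | nil => intro acc; rfl
  | cons ws rest ih =>
    intro acc
    have := pvAInner_eq bp ws.2 (ws.2.length - 1) 0 (by omega)
    simp only [List.take_zero, List.drop_zero, List.nil_append] at this
    simp [List.foldl, this, ih]

-- ===== VERDICT (by name: the statement is the Claim_ definition above) =====
theorem transform_splits_py_spec : Claim_equal_transform_splits_py := by
  intro bp splits _
  unfold Spec_transform_splits_py transform_splits_py transform_splits_py_alt
  rw [fold_eq]
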